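-- pv_equiv track=rewrite | github.com/WilliamRayJohnson/dailyProgrammer | challenges/335[easy]/consecutiveDistance.py | calcuateConsecutiveDist
-- ===== SOURCE A (Python) =====
-- def calcuateConsecutiveDist(listInput):
--     sortedList = list(listInput)
--     sortedList.sort()
--     consectDistRating = 0
--
--     for item in range(len(sortedList) - 1):
--         consecutiveValue = sortedList[item] + 1
--         if consecutiveValue == sortedList[item + 1]:
--             consectDistRating += abs(listInput.index(sortedList[item]) - listInput.index(sortedList[item + 1]))
--
--     return consectDistRating
-- ===== SOURCE B (Python) =====
-- def calcuateConsecutiveDist(listInput):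
--     first = {}
--     for i, v in enumerate(listInput):
--         first.setdefault(v, i)
--     return sum(abs(first[v] - first[v + 1]) for v in first if v + 1 in first)
-- ===== Notes on version B (the rewrite author's own statement) =====
-- stated objective: faster
-- what changed: B replaces the sort plus per-pair repeated list.index scans with one first-index dict built in a single pass, then sums |first[v]-first[v+1]| over the distinct values v whose successor v+1 is also present (no sort at all), exact because a sorted list has exactly one adjacent (v,v+1) boundary per present successor pair.
import Mathlib
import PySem

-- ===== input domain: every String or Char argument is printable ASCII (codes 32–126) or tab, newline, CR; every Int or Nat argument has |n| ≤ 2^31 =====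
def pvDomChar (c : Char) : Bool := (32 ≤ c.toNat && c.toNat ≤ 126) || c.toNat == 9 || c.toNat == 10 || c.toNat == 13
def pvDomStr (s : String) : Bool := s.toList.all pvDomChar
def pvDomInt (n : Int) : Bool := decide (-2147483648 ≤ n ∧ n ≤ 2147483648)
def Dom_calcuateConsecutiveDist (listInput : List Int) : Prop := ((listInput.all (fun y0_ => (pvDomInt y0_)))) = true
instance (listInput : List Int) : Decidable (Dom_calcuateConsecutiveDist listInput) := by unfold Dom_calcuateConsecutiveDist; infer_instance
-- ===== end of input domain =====

-- B builds a value→first-index dict in one pass and sums over the distinct values whose successor is present,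
-- replacing A's sort plus per-pair list.index scans (objective: faster).

-- ===== PORT A =====
def calcuateConsecutiveDist (listInput : List Int) : Int :=
  let sortedList := PySem.List.sorted listInput (fun x => x) false
  (PySem.List.pyRange 0 ((sortedList.length : Int) - 1) 1).foldl
    (fun consectDistRating item =>
      let consecutiveValue := PySem.List.pyGetD sortedList item 0 + 1
      if consecutiveValue = PySem.List.pyGetD sortedList (item + 1) 0 then
        consectDistRating +
          |(((PySem.List.index? listInput (PySem.List.pyGetD sortedList item 0)).getD 0 : Nat) : Int)
            - (((PySem.List.index? listInput (PySem.List.pyGetD sortedList (item + 1) 0)).getD 0 : Nat) : Int)|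
      else consectDistRating)
    0

-- ===== PORT B =====
def calcuateConsecutiveDist_alt (listInput : List Int) : Int :=
  let first := (PySem.List.enumerate listInput 0).foldl
    (fun d p => d.setdefault p.2 p.1) (PySem.Dict.empty : PySem.Dict Int Int)
  first.keys.foldl
    (fun acc v =>
      if first.contains (v + 1) then acc + |first.getD v 0 - first.getD (v + 1) 0|
      else acc)
    0

-- ===== PRECONDITION & SPEC =====
def Spec_calcuateConsecutiveDist (listInput : List Int) (out : Int) : Prop := out = calcuateConsecutiveDist_alt listInput
instance (listInput : List Int) (out : Int) : Decidable (Spec_calcuateConsecutiveDist listInput out) := by unfold Spec_calcuateConsecutiveDist; infer_instance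

-- ===== CLAIM (what is proved, stated in full; the proofs are below) =====
def Claim_equal_calcuateConsecutiveDist : Prop := ∀ (listInput : List Int), Dom_calcuateConsecutiveDist listInput → Spec_calcuateConsecutiveDist listInput (calcuateConsecutiveDist listInput)

-- ===== LEMMAS AND PROOFS =====

-- first index of v in l, as Int (0 when absent); both programs' per-value weight reduces to this
def pvFirstIdx (l : List Int) (v : Int) : Int := (((PySem.List.index? l v).getD 0 : Nat) : Int)

-- the contribution of the adjacent pair (a, b) of the sorted list
def pvPairG (l : List Int) (a b : Int) : Int :=
  if a + 1 = b then |pvFirstIdx l a - pvFirstIdx l b| else 0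

-- sum of pvPairG over adjacent pairs
def pvPairSum (l : List Int) : List Int → Int
  | [] => 0
  | [_] => 0
  | a :: b :: t => pvPairG l a b + pvPairSum l (b :: t)

-- B's first-occurrence dict
def pvFirstDict (l : List Int) : PySem.Dict Int Int :=
  (PySem.List.enumerate l 0).foldl (fun d p => d.setdefault p.2 p.1) (PySem.Dict.empty : PySem.Dict Int Int)

theorem pvFirstDict_append (xs : List Int) (x : Int) :
    pvFirstDict (xs ++ [x]) = (pvFirstDict xs).setdefault x ((xs.length : Int)) := by
  simp [pvFirstDict, PySem.List.enumerate_append, PySem.List.enumerate]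

theorem pvFirstDict_get? (l : List Int) (v : Int) :
    (pvFirstDict l).get? v = (PySem.List.index? l v).map (fun n => (n : Int)) := by
  induction l using List.reverseRecOn with
  | nil =>
    have h1 : PySem.List.index? ([] : List Int) v = none :=
      (PySem.List.index?_eq_none_iff _ v).2 (by simp)
    simp [pvFirstDict, PySem.List.enumerate]
  | append_singleton xs x ih =>
    rw [pvFirstDict_append]
    by_cases hvx : v = x
    · subst hvx
      rw [PySem.Dict.get?_setdefault_self, ih]
      by_cases hm : v ∈ xs
      · rw [PySem.List.index?_append_of_mem [v] hm]
        rcases Option.isSome_iff_exists.1 ((PySem.List.index?_isSome_iff xs v).2 hm) with ⟨k, hk⟩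
        rw [PySem.List.index?_eq_idxOf?] at hk
        simp [hk]
      · rw [PySem.List.index?_append_singleton_self xs v hm]
        have h1 : PySem.List.index? xs v = none := (PySem.List.index?_eq_none_iff xs v).2 hm
        rw [PySem.List.index?_eq_idxOf?] at h1
        simp [h1]
    · rw [PySem.Dict.get?_setdefault_of_ne _ _ hvx, ih]
      by_cases hm : v ∈ xs
      · rw [PySem.List.index?_append_of_mem [x] hm]
      · have h1 : PySem.List.index? xs v = none := (PySem.List.index?_eq_none_iff xs v).2 hm
        have h2 : PySem.List.index? (xs ++ [x]) v = none := by
          apply (PySem.List.index?_eq_none_iff _ v).2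
          simp [hm, hvx]
        rw [PySem.List.index?_eq_idxOf?] at h1
        rw [PySem.List.index?_eq_idxOf?] at h2
        simp [h1, h2]

theorem pvFirstDict_keys (l : List Int) : (pvFirstDict l).keys = PySem.List.dedup l := by
  induction l using List.reverseRecOn with
  | nil => rfl
  | append_singleton xs x ih =>
    rw [pvFirstDict_append]
    have hd : PySem.List.dedup (xs ++ [x]) = PySem.Set.add (PySem.List.dedup xs) x := by
      simp only [PySem.List.dedup_eq_ofList]
      exact PySem.Set.ofList_append_singleton xs x
    by_cases hm : x ∈ xs
    · have hc : (pvFirstDict xs).contains x = true := by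
        rw [PySem.Dict.contains_eq_isSome_get?, pvFirstDict_get?]
        rcases Option.isSome_iff_exists.1 ((PySem.List.index?_isSome_iff xs x).2 hm) with ⟨k, hk⟩
        rw [PySem.List.index?_eq_idxOf?] at hk
        simp [hk]
      rw [PySem.Dict.setdefault_of_contains _ _ hc, ih, hd,
        PySem.Set.add_of_mem ((PySem.List.mem_dedup xs x).2 hm)]
    · have hc : (pvFirstDict xs).contains x = false := by
        rw [PySem.Dict.contains_eq_isSome_get?, pvFirstDict_get?]
        have h1 : PySem.List.index? xs x = none := (PySem.List.index?_eq_none_iff xs x).2 hm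
        rw [PySem.List.index?_eq_idxOf?] at h1
        simp [h1]
      rw [PySem.Dict.setdefault_of_not_contains _ _ hc,
        PySem.Dict.keys_insert_of_not_contains _ _ hc, ih, hd,
        PySem.Set.add_of_not_mem (fun h => hm ((PySem.List.mem_dedup xs x).1 h))]

theorem pvFirstDict_getD (l : List Int) (v : Int) :
    (pvFirstDict l).getD v 0 = pvFirstIdx l v := by
  rw [PySem.Dict.getD_eq_get?_getD, pvFirstDict_get?, pvFirstIdx]
  cases PySem.List.index? l v <;> simp

theorem pvFirstDict_contains (l : List Int) (v : Int) :
    (pvFirstDict l).contains v = decide (v ∈ l) := by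
  rw [PySem.Dict.contains_eq_isSome_get?, pvFirstDict_get?]
  by_cases hm : v ∈ l
  · rcases Option.isSome_iff_exists.1 ((PySem.List.index?_isSome_iff l v).2 hm) with ⟨k, hk⟩
    rw [PySem.List.index?_eq_idxOf?] at hk
    simp [hk, hm]
  · have h1 : PySem.List.index? l v = none := (PySem.List.index?_eq_none_iff l v).2 hm
    rw [PySem.List.index?_eq_idxOf?] at h1
    simp [h1, hm]

-- head of a ≤-sorted list is its minimum
theorem pv_head_min {b : Int} {r : List Int} (hp : (b :: r).Pairwise (· ≤ ·)) :
    ∀ x ∈ b :: r, b ≤ x := by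
  intro x hx
  rcases List.mem_cons.1 hx with h | h
  · omega
  · exact (List.pairwise_cons.1 hp).1 x h

-- MASTER LEMMA: on a ≤-sorted list, the adjacent-pair sum is the per-distinct-value sum
theorem pvPairSum_eq_finset (l : List Int) :
    ∀ (s : List Int), s.Pairwise (· ≤ ·) →
      pvPairSum l s =
        ∑ v ∈ s.toFinset, (if v + 1 ∈ s then |pvFirstIdx l v - pvFirstIdx l (v + 1)| else 0) := by
  intro s
  induction s with
  | nil => intro _; simp [pvPairSum]
  | cons a tl ih =>
    intro hp
    rcases List.pairwise_cons.1 hp with ⟨ha, htl⟩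
    cases tl with
    | nil =>
      simp [pvPairSum]
    | cons b r =>
      have hmin : ∀ x ∈ b :: r, b ≤ x := pv_head_min htl
      have hab : a ≤ b := ha b (by simp)
      rw [show pvPairSum l (a :: b :: r) = pvPairG l a b + pvPairSum l (b :: r) from rfl, ih htl]
      by_cases hm : a ∈ b :: r
      · -- duplicate head: b = a, the pair (a, b) contributes 0 and the distinct set is unchanged
        have hba : b = a := le_antisymm (hmin a hm) hab
        have hne : ¬ (a + 1 = b) := by omega
        have hg : pvPairG l a b = 0 := by rw [pvPairG, if_neg hne]
        have hts : (a :: b :: r).toFinset = (b :: r).toFinset := by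
          simp only [List.toFinset_cons]
          exact Finset.insert_eq_self.2 (by simpa using hm)
        rw [hg, hts, zero_add]
        apply Finset.sum_congr rfl
        intro v _
        have hiff : (v + 1 ∈ a :: b :: r) ↔ (v + 1 ∈ b :: r) := by
          subst hba
          simp only [List.mem_cons]
          tauto
        simp only [hiff]
      · -- fresh head: a < b; a + 1 ∈ s iff b = a + 1, and the head term is exactly pvPairG l a b
        have haneb : a ≠ b := fun h => hm (h ▸ (by simp))
        have haltb : a < b := lt_of_le_of_ne hab haneb
        have hts : (a :: b :: r).toFinset = insert a ((b :: r).toFinset) := by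
          simp [List.toFinset_cons]
        have hnotin : a ∉ (b :: r).toFinset := fun h => hm (List.mem_toFinset.1 h)
        rw [hts, Finset.sum_insert hnotin]
        congr 1
        · -- head term
          have hiff2 : (a + 1 ∈ a :: b :: r) ↔ a + 1 = b := by
            simp only [List.mem_cons]
            constructor
            · rintro (h | h | h)
              · omega
              · exact h
              · have := hmin _ (List.mem_cons.2 (Or.inr h))
                omega
            · intro h
              exact Or.inr (Or.inl h)
          rw [pvPairG]
          by_cases hone : a + 1 = b
          · rw [if_pos hone, if_pos (hiff2.2 hone), hone]
          · rw [if_neg hone, if_neg (fun h => hone (hiff2.1 h))]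
        · -- tail terms: v + 1 > a for every v in the tail, so the membership conditions agree
          apply Finset.sum_congr rfl
          intro v hv
          have hbv : b ≤ v := hmin v (List.mem_toFinset.1 hv)
          have hiff : (v + 1 ∈ a :: b :: r) ↔ (v + 1 ∈ b :: r) := by
            simp only [List.mem_cons]
            constructor
            · rintro (h | h | h)
              · omega
              · exact Or.inl h
              · exact Or.inr h
            · rintro (h | h)
              · exact Or.inr (Or.inl h)
              · exact Or.inr (Or.inr h)
          simp only [hiff]

-- A's fold over range indices is the adjacent-pair recursion
theorem pvRangeSum_eq_pairSum (l : List Int) :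
    ∀ (s : List Int),
      ((List.range (s.length - 1)).map
        (fun k => pvPairG l (s.getD k 0) (s.getD (k + 1) 0))).sum = pvPairSum l s := by
  intro s
  induction s with
  | nil => simp [pvPairSum]
  | cons a tl ih =>
    cases tl with
    | nil => simp [pvPairSum]
    | cons b r =>
      rw [show (a :: b :: r).length - 1 = r.length + 1 from by simp, List.range_succ_eq_map]
      simp only [List.map_cons, List.map_map, List.sum_cons]
      rw [show pvPairSum l (a :: b :: r) = pvPairG l a b + pvPairSum l (b :: r) from rfl]
      refine congrArg₂ (· + ·) rfl ?_
      rw [← ih, show (b :: r).length - 1 = r.length from by simp]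
      apply congrArg List.sum
      apply List.map_congr_left
      intro k _
      rfl

theorem pvA_eq_pairSum (l : List Int) :
    calcuateConsecutiveDist l = pvPairSum l (PySem.List.sorted l (fun x => x) false) := by
  have hA : calcuateConsecutiveDist l =
      (PySem.List.pyRange 0 (((PySem.List.sorted l (fun x => x) false).length : Int) - 1) 1).foldl
        (fun consectDistRating item =>
          if PySem.List.pyGetD (PySem.List.sorted l (fun x => x) false) item 0 + 1
              = PySem.List.pyGetD (PySem.List.sorted l (fun x => x) false) (item + 1) 0 then
            consectDistRating +
              |(((PySem.List.index? l (PySem.List.pyGetD (PySem.List.sorted l (fun x => x) false) item 0)).getD 0 : Nat) : Int)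
                - (((PySem.List.index? l (PySem.List.pyGetD (PySem.List.sorted l (fun x => x) false) (item + 1) 0)).getD 0 : Nat) : Int)|
          else consectDistRating) 0 := rfl
  rw [hA]
  set s := PySem.List.sorted l (fun x => x) false with hs
  have hbody : (PySem.List.pyRange 0 ((s.length : Int) - 1) 1).foldl
      (fun consectDistRating item =>
        if PySem.List.pyGetD s item 0 + 1 = PySem.List.pyGetD s (item + 1) 0 then
          consectDistRating +
            |(((PySem.List.index? l (PySem.List.pyGetD s item 0)).getD 0 : Nat) : Int)
              - (((PySem.List.index? l (PySem.List.pyGetD s (item + 1) 0)).getD 0 : Nat) : Int)|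
        else consectDistRating) 0
      = (PySem.List.pyRange 0 ((s.length : Int) - 1) 1).foldl
        (fun acc item => acc + pvPairG l (PySem.List.pyGetD s item 0) (PySem.List.pyGetD s (item + 1) 0)) 0 := by
    apply PySem.List.foldl_congr_mem
    intro acc x _
    simp only [pvPairG, pvFirstIdx]
    by_cases h : PySem.List.pyGetD s x 0 + 1 = PySem.List.pyGetD s (x + 1) 0
    · simp [h]
    · simp [h]
  rw [hbody, PySem.List.foldl_add, zero_add]
  by_cases hzero : s.length = 0
  · have hnil : s = [] := List.eq_nil_of_length_eq_zero hzero
    rw [hnil]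
    rw [show PySem.List.pyRange 0 ((([] : List Int).length : Int) - 1) 1 = [] from
      PySem.List.pyRange_one_eq_nil (by simp)]
    rfl
  · have hcast : ((s.length : Int) - 1) = ((s.length - 1 : Nat) : Int) := by omega
    rw [hcast, PySem.List.pyRange_zero_natCast, ← pvRangeSum_eq_pairSum l s, List.map_map]
    congr 1
    apply List.map_congr_left
    intro k _
    simp only [Function.comp]
    have h1 : PySem.List.pyGetD s ((k : Int)) 0 = s.getD k 0 := PySem.List.pyGetD_natCast s k 0
    have h2 : PySem.List.pyGetD s ((k : Int) + 1) 0 = s.getD (k + 1) 0 := by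
      have h3 := PySem.List.pyGetD_natCast s (k + 1) 0
      push_cast at h3
      exact h3
    rw [h1, h2]

theorem pvB_eq_finset (l : List Int) :
    calcuateConsecutiveDist_alt l =
      ∑ v ∈ l.toFinset, (if v + 1 ∈ l then |pvFirstIdx l v - pvFirstIdx l (v + 1)| else 0) := by
  have hB : calcuateConsecutiveDist_alt l = (pvFirstDict l).keys.foldl
      (fun acc v =>
        if (pvFirstDict l).contains (v + 1) then
          acc + |(pvFirstDict l).getD v 0 - (pvFirstDict l).getD (v + 1) 0|
        else acc) 0 := rfl
  rw [hB]
  have hbody : (pvFirstDict l).keys.foldl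
      (fun acc v =>
        if (pvFirstDict l).contains (v + 1) then
          acc + |(pvFirstDict l).getD v 0 - (pvFirstDict l).getD (v + 1) 0|
        else acc) 0
      = (pvFirstDict l).keys.foldl
        (fun acc v => acc + (if v + 1 ∈ l then |pvFirstIdx l v - pvFirstIdx l (v + 1)| else 0)) 0 := by
    apply PySem.List.foldl_congr_mem
    intro acc v _
    rw [pvFirstDict_contains, pvFirstDict_getD, pvFirstDict_getD]
    by_cases h : v + 1 ∈ l
    · simp [h]
    · simp [h]
  rw [hbody, PySem.List.foldl_add, zero_add, pvFirstDict_keys,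
    ← List.sum_toFinset _ (PySem.List.nodup_dedup l)]
  congr 1
  apply Finset.ext
  intro v
  simp

-- ===== VERDICT (by name: the statement is the Claim_ definition above) =====
theorem calcuateConsecutiveDist_spec : Claim_equal_calcuateConsecutiveDist := by
  intro l _
  unfold Spec_calcuateConsecutiveDist
  rw [pvA_eq_pairSum, pvB_eq_finset]
  have hperm : (PySem.List.sorted l (fun x => x) false).Perm l := PySem.List.sorted_perm l _ _
  have hpw : (PySem.List.sorted l (fun x => x) false).Pairwise (· ≤ ·) := by
    simpa using PySem.List.sorted_pairwise l (fun x => x)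
  have hts : (PySem.List.sorted l (fun x => x) false).toFinset = l.toFinset := by
    apply Finset.ext
    intro v
    simp [hperm.mem_iff]
  rw [pvPairSum_eq_finset l _ hpw, hts]
  apply Finset.sum_congr rfl
  intro v _
  simp [hperm.mem_iff]
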